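-- pv_equiv track=rewrite | github.com/Moealfadil/IEEEXtereme18.0 | Xtereme/Stick.py | union_area_of_squares
-- ===== SOURCE A (Python) =====
-- def union_area_of_squares(N, K, L):
--     events = []
--     for i in range(N):
--         x_start = i * K - L
--         x_end = i * K + L
--         y_bottom = i * K - L
--         y_top = i * K + L
--         events.append((x_start, y_bottom, y_top, 1))
--         events.append((x_end, y_bottom, y_top, -1))
--
--     events.sort()
--
--     active_intervals = []
--     previous_x = events[0][0]
--     total_area = 0
--
--     def calculate_y_coverage():
--         if not active_intervals:
--             return 0
--         active_intervals.sort()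
--         current_start, current_end = active_intervals[0]
--         y_coverage = 0
--         for start, end in active_intervals:
--             if start > current_end:
--                 y_coverage += current_end - current_start
--                 current_start, current_end = start, end
--             else:
--                 current_end = max(current_end, end)
--         y_coverage += current_end - current_start
--         return y_coverage
--
--     for x, y_bottom, y_top, event_type in events:
--         total_area += (x - previous_x) * calculate_y_coverage()
--         previous_x = x
--
--         if event_type == 1:
--             active_intervals.append((y_bottom, y_top))
--         else:
--             active_intervals.remove((y_bottom, y_top))
--
--     return total_area
-- ===== SOURCE B (Python) =====
-- def union_area_of_squares(N, K, L):
--     # The N squares sit on a diagonal with equal spacing |K|; every pairwise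
--     # intersection is nested inside an intersection of consecutive squares,
--     # so the union area collapses to a closed form.
--     if N < 1 or L < 1:
--         raise ValueError("need at least one square of positive size")
--     side = 2 * L
--     overlap = side - abs(K)
--     if overlap < 0:
--         overlap = 0
--     return N * side * side - (N - 1) * overlap * overlap
-- ===== Notes on version B (the rewrite author's own statement) =====
-- stated objective: faster
-- what changed: Replaced the O(N^2 log N) sweep line over 2N events (with a full sort-and-merge of the active intervals at every event) by an O(1) inclusion-exclusion closed form: squares on the diagonal overlap only in a nested chain, so union = N*(2L)^2 - (N-1)*max(0, 2L-|K|)^2.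
import Mathlib
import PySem

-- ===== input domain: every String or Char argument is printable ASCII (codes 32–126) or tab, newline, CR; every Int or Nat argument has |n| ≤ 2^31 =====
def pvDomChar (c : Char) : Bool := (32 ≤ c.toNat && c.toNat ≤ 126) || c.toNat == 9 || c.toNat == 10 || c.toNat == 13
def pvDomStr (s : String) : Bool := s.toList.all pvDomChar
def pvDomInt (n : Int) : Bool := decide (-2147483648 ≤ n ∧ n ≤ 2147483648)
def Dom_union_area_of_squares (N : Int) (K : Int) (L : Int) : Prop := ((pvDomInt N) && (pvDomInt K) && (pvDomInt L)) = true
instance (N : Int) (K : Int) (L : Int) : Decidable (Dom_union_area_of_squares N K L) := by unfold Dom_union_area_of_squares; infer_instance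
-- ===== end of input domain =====

-- B replaces A's O(N^2 log N) sweep line by an O(1) inclusion-exclusion closed form
-- (consecutive-square overlaps are the only non-nested intersections on the diagonal).

-- ===== PORT A =====

-- Python's lexicographic `<` on the 4-tuples pushed into `events` (exact).
def pvEvLt (a b : Int × Int × Int × Int) : Bool :=
  decide (a.1 < b.1 ∨ (a.1 = b.1 ∧ (a.2.1 < b.2.1 ∨ (a.2.1 = b.2.1 ∧
    (a.2.2.1 < b.2.2.1 ∨ (a.2.2.1 = b.2.2.1 ∧ a.2.2.2 < b.2.2.2))))))

-- Python's lexicographic `<` on the pairs in `active_intervals` (exact).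
def pvPairLt (a b : Int × Int) : Bool :=
  decide (a.1 < b.1 ∨ (a.1 = b.1 ∧ a.2 < b.2))

-- list.sort() with comparator lt: PySem's stable insertion sort shape
-- (PySem.List.sorted is definitionally this fold, cf. sorted_eq_foldl_insertBy;
--  here the 4-tuple / pair lexicographic order is spelled out by hand).
def pvSort {α : Type} (lt : α → α → Bool) (xs : List α) : List α :=
  xs.foldl (fun acc x => PySem.List.insertBy lt x acc) []

-- loop body of calculate_y_coverage; state t = (current_start, current_end, y_coverage)
def pvMergeStep (t : Int × Int × Int) (p : Int × Int) : Int × Int × Int :=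
  if p.1 > t.2.1 then (p.1, p.2, t.2.2 + t.2.1 - t.1)
  else (t.1, max t.2.1 p.2, t.2.2)

-- exact port of calculate_y_coverage; Python's in-place active_intervals.sort()
-- is returned as the second component (the mutated list the caller keeps).
def pvCalcCoverage (active : List (Int × Int)) : Int × List (Int × Int) :=
  if active = [] then (0, active)
  else
    let srt := pvSort pvPairLt active
    match srt with
    | [] => (0, srt)
    | (s0, e0) :: _ =>
      let t := srt.foldl pvMergeStep (s0, e0, 0)
      (t.2.2 + t.2.1 - t.1, srt)

-- one iteration of A's event loop; state = (active_intervals, previous_x, total_area)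
def pvStep (st : List (Int × Int) × Int × Int) (ev : Int × Int × Int × Int) :
    List (Int × Int) × Int × Int :=
  let c := pvCalcCoverage st.1
  let total := st.2.2 + (ev.1 - st.2.1) * c.1
  if ev.2.2.2 = 1 then (c.2 ++ [(ev.2.1, ev.2.2.1)], ev.1, total)
  else
    match PySem.List.remove? c.2 (ev.2.1, ev.2.2.1) with
    | some l => (l, ev.1, total)
    | none => (c.2, ev.1, total)   -- list.remove raises ValueError here (L ≤ 0): excluded by Pre_

def union_area_of_squares (N : Int) (K : Int) (L : Int) : Int :=
  let events := (PySem.List.pyRange 0 N 1).foldl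
      (fun acc i => acc ++ [(i*K - L, i*K - L, i*K + L, (1:Int)), (i*K + L, i*K - L, i*K + L, (-1:Int))]) []
  let evs := pvSort pvEvLt events
  match evs with
  | [] => 0   -- events[0] raises IndexError (N ≤ 0): excluded by Pre_
  | e0 :: _ => (evs.foldl pvStep ([], e0.1, 0)).2.2

-- ===== PORT B =====
def union_area_of_squares_alt (N : Int) (K : Int) (L : Int) : Int :=
  if N < 1 ∨ L < 1 then 0   -- Source B raises ValueError here: excluded by Pre_
  else
    let side := 2 * L
    let overlap0 := side - |K|
    let overlap := if overlap0 < 0 then 0 else overlap0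
    N * side * side - (N - 1) * overlap * overlap

-- ===== PRECONDITION & SPEC =====
-- Pre_ excludes exactly the inputs on which A raises: N ≤ 0 (IndexError on events[0])
-- and L ≤ 0 (ValueError: an end event is sorted before its start event, so
-- active_intervals.remove fails). A returns normally on all other inputs.
def Pre_union_area_of_squares (N : Int) (K : Int) (L : Int) : Prop := 1 ≤ N ∧ 1 ≤ L
instance (N : Int) (K : Int) (L : Int) : Decidable (Pre_union_area_of_squares N K L) := by
  unfold Pre_union_area_of_squares; infer_instance

def pvWitness_union_area_of_squares : Int × Int × Int := (2, 1, 1)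

def Spec_union_area_of_squares (N : Int) (K : Int) (L : Int) (out : Int) : Prop :=
  out = union_area_of_squares_alt N K L
instance (N : Int) (K : Int) (L : Int) (out : Int) : Decidable (Spec_union_area_of_squares N K L out) := by
  unfold Spec_union_area_of_squares; infer_instance

-- ===== CLAIM (what is proved, stated in full; the proofs are below) =====
def Claim_equal_union_area_of_squares : Prop := ∀ (N : Int) (K : Int) (L : Int), Dom_union_area_of_squares N K L → Pre_union_area_of_squares N K L → Spec_union_area_of_squares N K L (union_area_of_squares N K L)

-- ===== LEMMAS AND PROOFS =====

-- ---- generic stable insertion sort characterization ----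

theorem pvInsertBy_cons {α : Type} (lt : α → α → Bool) (x y : α) (ys : List α) :
    PySem.List.insertBy lt x (y :: ys)
      = if lt x y then x :: y :: ys else y :: PySem.List.insertBy lt x ys := by
  simp [PySem.List.insertBy]

theorem pvInsertBy_nil {α : Type} (lt : α → α → Bool) (x : α) :
    PySem.List.insertBy lt x [] = [x] := rfl

theorem pvInsertBy_perm {α : Type} (lt : α → α → Bool) (x : α) (ys : List α) :
    (PySem.List.insertBy lt x ys).Perm (x :: ys) := by
  induction ys with
  | nil => simp [pvInsertBy_nil]
  | cons y t ih =>
    rw [pvInsertBy_cons]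
    split
    · exact List.Perm.refl _
    · exact (List.Perm.cons y ih).trans (List.Perm.swap x y t)

theorem pvInsertBy_pairwise {α : Type} (lt : α → α → Bool)
    (hasym : ∀ a b, lt a b = true → lt b a = false)
    (htrans : ∀ a b c, lt a b = true → lt b c = true → lt a c = true)
    (x : α) (ys : List α) (h : ys.Pairwise (fun a b => lt b a = false)) :
    (PySem.List.insertBy lt x ys).Pairwise (fun a b => lt b a = false) := by
  induction ys with
  | nil => simp [pvInsertBy_nil]
  | cons y t ih =>
    rw [pvInsertBy_cons]
    rcases List.pairwise_cons.mp h with ⟨hy, ht⟩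
    by_cases hxy : lt x y = true
    · simp only [hxy, if_true]
      refine List.pairwise_cons.mpr ⟨?_, h⟩
      intro z hz
      rcases hz with _ | hz
      · exact hasym _ _ hxy
      · by_contra hzx
        have hzx' : lt z x = true := by
          cases hc : lt z x with
          | true => rfl
          | false => exact absurd hc hzx
        have := htrans _ _ _ hzx' hxy
        have := hy z (by assumption)
        simp_all
    · have hxy' : lt x y = false := by
        cases hc : lt x y with
        | true => exact absurd hc hxy
        | false => rfl
      simp only [hxy]
      refine List.pairwise_cons.mpr ⟨?_, ih ht⟩
      intro z hz
      have hz' : z = x ∨ z ∈ t := by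
        have := (pvInsertBy_perm lt x t).mem_iff.mp hz
        simpa using this
      rcases hz' with rfl | hz'
      · exact hxy'
      · exact hy z hz'

theorem pvSort_perm_aux {α : Type} (lt : α → α → Bool) :
    ∀ (xs acc : List α),
      (xs.foldl (fun acc x => PySem.List.insertBy lt x acc) acc).Perm (acc ++ xs) := by
  intro xs
  induction xs with
  | nil => intro acc; simp
  | cons x t ih =>
    intro acc
    have h1 := ih (PySem.List.insertBy lt x acc)
    have h2 : (PySem.List.insertBy lt x acc ++ t).Perm (acc ++ x :: t) := by
      have := (pvInsertBy_perm lt x acc).append_right t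
      refine this.trans ?_
      simpa using (List.perm_middle (a := x) (l₁ := acc) (l₂ := t)).symm
    simpa using h1.trans h2

theorem pvSort_perm {α : Type} (lt : α → α → Bool) (xs : List α) :
    (pvSort lt xs).Perm xs := by
  simpa [pvSort] using pvSort_perm_aux lt xs []

theorem pvSort_pairwise {α : Type} (lt : α → α → Bool)
    (hasym : ∀ a b, lt a b = true → lt b a = false)
    (htrans : ∀ a b c, lt a b = true → lt b c = true → lt a c = true)
    (xs : List α) :
    (pvSort lt xs).Pairwise (fun a b => lt b a = false) := by
  have : ∀ (xs acc : List α), acc.Pairwise (fun a b => lt b a = false) →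
      (xs.foldl (fun acc x => PySem.List.insertBy lt x acc) acc).Pairwise (fun a b => lt b a = false) := by
    intro xs
    induction xs with
    | nil => intro acc h; simpa
    | cons x t ih =>
      intro acc h
      exact ih _ (pvInsertBy_pairwise lt hasym htrans x acc h)
  simpa [pvSort] using this xs [] (by simp)

theorem pvSort_eq_of {α : Type} (lt : α → α → Bool)
    (hasym : ∀ a b, lt a b = true → lt b a = false)
    (htrans : ∀ a b c, lt a b = true → lt b c = true → lt a c = true)
    (hconn : ∀ a b, lt a b = false → lt b a = false → a = b)
    (xs cand : List α)
    (hperm : cand.Perm xs)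
    (hpw : cand.Pairwise (fun a b => lt b a = false)) :
    pvSort lt xs = cand := by
  have h1 : (pvSort lt xs).Perm cand := (pvSort_perm lt xs).trans hperm.symm
  exact List.eq_of_perm_of_sorted (fun a b _ _ hab hba => (hconn b a hab hba).symm)
    (pvSort_pairwise lt hasym htrans xs) hpw h1

-- order facts for the two comparators

theorem pvEvLt_asym (a b : Int × Int × Int × Int) : pvEvLt a b = true → pvEvLt b a = false := by
  obtain ⟨a1, a2, a3, a4⟩ := a; obtain ⟨b1, b2, b3, b4⟩ := b
  simp only [pvEvLt, decide_eq_true_eq, decide_eq_false_iff_not]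
  omega

theorem pvEvLt_trans (a b c : Int × Int × Int × Int) :
    pvEvLt a b = true → pvEvLt b c = true → pvEvLt a c = true := by
  obtain ⟨a1, a2, a3, a4⟩ := a; obtain ⟨b1, b2, b3, b4⟩ := b; obtain ⟨c1, c2, c3, c4⟩ := c
  simp only [pvEvLt, decide_eq_true_eq]
  omega

theorem pvEvLt_conn (a b : Int × Int × Int × Int) :
    pvEvLt a b = false → pvEvLt b a = false → a = b := by
  obtain ⟨a1, a2, a3, a4⟩ := a; obtain ⟨b1, b2, b3, b4⟩ := b
  simp only [pvEvLt, decide_eq_false_iff_not, Prod.mk.injEq]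
  omega

theorem pvPairLt_asym (a b : Int × Int) : pvPairLt a b = true → pvPairLt b a = false := by
  obtain ⟨a1, a2⟩ := a; obtain ⟨b1, b2⟩ := b
  simp only [pvPairLt, decide_eq_true_eq, decide_eq_false_iff_not]
  omega

theorem pvPairLt_trans (a b c : Int × Int) :
    pvPairLt a b = true → pvPairLt b c = true → pvPairLt a c = true := by
  obtain ⟨a1, a2⟩ := a; obtain ⟨b1, b2⟩ := b; obtain ⟨c1, c2⟩ := c
  simp only [pvPairLt, decide_eq_true_eq]
  omega

theorem pvPairLt_conn (a b : Int × Int) :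
    pvPairLt a b = false → pvPairLt b a = false → a = b := by
  obtain ⟨a1, a2⟩ := a; obtain ⟨b1, b2⟩ := b
  simp only [pvPairLt, decide_eq_false_iff_not, Prod.mk.injEq]
  omega

-- ---- the geometry: squares on the diagonal ----

def pvB (b0 d : Int) (j : Nat) : Int := b0 + (j : Int) * d
def pvS (b0 d s : Int) (j : Nat) : Int × Int × Int × Int :=
  (pvB b0 d j, pvB b0 d j, pvB b0 d j + s, 1)
def pvE (b0 d s : Int) (j : Nat) : Int × Int × Int × Int :=
  (pvB b0 d j + s, pvB b0 d j, pvB b0 d j + s, -1)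
def pvI (b0 d s : Int) (j : Nat) : Int × Int := (pvB b0 d j, pvB b0 d j + s)
def pvAct (b0 d s : Int) (a m : Nat) : List (Int × Int) := (List.range' a m).map (pvI b0 d s)
def pvCov (c s : Int) (m : Nat) : Int := if m = 0 then 0 else ((m : Int) - 1) * c + s
def pvW (d c s : Int) : Nat → Int
  | 0 => 0
  | (m+1) => pvW d c s m + d * ((m : Int) * c + s)
def pvQ (d s : Int) (n : Nat) : Nat := if d = 0 then n else min n (((s-1)/d).toNat + 1)

def pvCand (b0 d s : Int) (n q : Nat) : List (Int × Int × Int × Int) :=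
  (List.range q).map (pvS b0 d s) ++
  (List.range (n - q)).flatMap (fun i => [pvE b0 d s i, pvS b0 d s (i + q)]) ++
  (List.range q).map (fun k => pvE b0 d s (n - q + k))

-- pvB arithmetic

theorem pvB_mono (b0 d : Int) (hd : 0 ≤ d) {i j : Nat} (h : i ≤ j) :
    pvB b0 d i ≤ pvB b0 d j := by
  unfold pvB
  have h1 : (i : Int) ≤ (j : Int) := by exact_mod_cast h
  nlinarith

theorem pvB_sub (b0 d : Int) (i j : Nat) :
    pvB b0 d j - pvB b0 d i = ((j : Int) - (i : Int)) * d := by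
  unfold pvB; push_cast; ring

-- the four "earlier event is not greater" facts for the lexicographic order

theorem ltSS (b0 d s : Int) {i j : Nat} (h : pvB b0 d i ≤ pvB b0 d j) :
    pvEvLt (pvS b0 d s j) (pvS b0 d s i) = false := by
  simp only [pvS, pvEvLt, decide_eq_false_iff_not]
  omega

theorem ltEE (b0 d s : Int) {i j : Nat} (h : pvB b0 d i ≤ pvB b0 d j) :
    pvEvLt (pvE b0 d s j) (pvE b0 d s i) = false := by
  simp only [pvE, pvEvLt, decide_eq_false_iff_not]
  omega

theorem ltES (b0 d s : Int) {i j : Nat} (h : pvB b0 d j < pvB b0 d i + s) :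
    pvEvLt (pvE b0 d s i) (pvS b0 d s j) = false := by
  simp only [pvE, pvS, pvEvLt, decide_eq_false_iff_not]
  omega

theorem ltSE (b0 d s : Int) (hs : 0 < s) {i j : Nat} (h : pvB b0 d i + s ≤ pvB b0 d j) :
    pvEvLt (pvS b0 d s j) (pvE b0 d s i) = false := by
  simp only [pvE, pvS, pvEvLt, decide_eq_false_iff_not]
  omega

theorem ltII (b0 d s : Int) {i j : Nat} (h : pvB b0 d i ≤ pvB b0 d j) :
    pvPairLt (pvI b0 d s j) (pvI b0 d s i) = false := by
  simp only [pvI, pvPairLt, decide_eq_false_iff_not]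
  omega

-- properties of the strip width q

theorem pvQ_facts (d s : Int) (n : Nat) (hd : 0 ≤ d) (hs : 2 ≤ s) (hn : 1 ≤ n) :
    1 ≤ pvQ d s n ∧ pvQ d s n ≤ n ∧ ((pvQ d s n : Int) - 1) * d < s ∧
      (pvQ d s n < n → s ≤ (pvQ d s n : Int) * d) ∧ (d = 0 → pvQ d s n = n) := by
  by_cases h0 : d = 0
  · subst h0
    have hq : pvQ 0 s n = n := by unfold pvQ; simp
    rw [hq]
    refine ⟨hn, le_rfl, by simp; omega, by omega, fun _ => rfl⟩
  · have hq : pvQ d s n = min n (((s-1)/d).toNat + 1) := by unfold pvQ; rw [if_neg h0]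
    rw [hq]
    have hd1 : 1 ≤ d := by omega
    have hdiv : d * ((s-1)/d) + (s-1) % d = s - 1 := Int.ediv_add_emod _ _
    have hm1 : 0 ≤ (s-1) % d := Int.emod_nonneg _ (by omega)
    have hm2 : (s-1) % d < d := Int.emod_lt_of_pos _ (by omega)
    have htnn : 0 ≤ (s-1)/d := Int.ediv_nonneg (by omega) (by omega)
    have htc : (((s-1)/d).toNat : Int) = (s-1)/d := Int.toNat_of_nonneg htnn
    refine ⟨by omega, by omega, ?_, ?_, fun h => absurd h h0⟩
    · have e1 : ((min n (((s-1)/d).toNat + 1) : Nat) : Int) - 1 ≤ (((s-1)/d).toNat : Int) := by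
        push_cast; omega
      have e2 : (((s-1)/d).toNat : Int) * d ≤ s - 1 := by
        rw [htc]; nlinarith
      have e3 := mul_le_mul_of_nonneg_right e1 hd
      linarith
    · intro hlt
      have hmin : min n (((s-1)/d).toNat + 1) = ((s-1)/d).toNat + 1 := by omega
      rw [hmin]
      have e : ((((s-1)/d).toNat : Int) + 1) * d = d * ((s-1)/d) + d := by rw [htc]; ring
      push_cast
      linarith

-- generic interleaved-block lemmas

theorem pairwise_flat_pairs {α : Type} (r : α → α → Prop) (u v : Nat → α) (m : Nat)
    (huv : ∀ i j, i ≤ j → j < m → r (u i) (v j))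
    (huu : ∀ i j, i < j → j < m → r (u i) (u j))
    (hvv : ∀ i j, i < j → j < m → r (v i) (v j))
    (hvu : ∀ i j, i < j → j < m → r (v i) (u j)) :
    ((List.range m).flatMap (fun i => [u i, v i])).Pairwise r := by
  induction m with
  | zero => simp
  | succ m ih =>
    rw [List.range_succ, List.flatMap_append]
    refine List.pairwise_append.mpr ⟨ih (fun i j h1 h2 => huv i j h1 (by omega))
      (fun i j h1 h2 => huu i j h1 (by omega)) (fun i j h1 h2 => hvv i j h1 (by omega))
      (fun i j h1 h2 => hvu i j h1 (by omega)), ?_, ?_⟩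
    · simp only [List.flatMap_cons, List.flatMap_nil, List.append_nil]
      exact List.pairwise_pair.mpr (huv m m le_rfl (by omega))
    · intro x hx y hy
      simp only [List.flatMap_cons, List.flatMap_nil, List.append_nil, List.mem_cons,
        List.not_mem_nil, or_false] at hy
      simp only [List.mem_flatMap, List.mem_range, List.mem_cons, List.not_mem_nil,
        or_false] at hx
      obtain ⟨i, hi, hx⟩ := hx
      rcases hx with rfl | rfl <;> rcases hy with rfl | rfl
      · exact huu i m hi (by omega)
      · exact huv i m (by omega) (by omega)
      · exact hvu i m hi (by omega)
      · exact hvv i m hi (by omega)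

theorem perm_append_middle {α : Type} (A B C D : List α) :
    ((A ++ B) ++ (C ++ D)).Perm ((A ++ C) ++ (B ++ D)) := by
  have h : (B ++ C).Perm (C ++ B) := List.perm_append_comm
  have e1 : (A ++ B) ++ (C ++ D) = A ++ ((B ++ C) ++ D) := by simp [List.append_assoc]
  have e2 : (A ++ C) ++ (B ++ D) = A ++ ((C ++ B) ++ D) := by simp [List.append_assoc]
  rw [e1, e2]
  exact List.Perm.append_left _ (h.append_right _)

theorem perm_flat_pairs {α : Type} (u v : Nat → α) (m : Nat) :
    ((List.range m).flatMap (fun i => [u i, v i])).Perm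
      ((List.range m).map u ++ (List.range m).map v) := by
  induction m with
  | zero => simp
  | succ m ih =>
    rw [List.range_succ, List.flatMap_append, List.map_append, List.map_append]
    simp only [List.flatMap_cons, List.flatMap_nil, List.append_nil, List.map_cons,
      List.map_nil]
    have h1 : ((List.range m).flatMap (fun i => [u i, v i]) ++ [u m, v m]).Perm
        (((List.range m).map u ++ (List.range m).map v) ++ ([u m] ++ [v m])) := by
      exact ih.append_right _
    refine h1.trans ?_
    exact perm_append_middle _ _ _ _

theorem revmap_perm {α : Type} (w : Nat → α) (n : Nat) :
    ((List.range n).map (fun i => w (n - 1 - i))).Perm ((List.range n).map w) := by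
  have he : (List.range n).map (fun i => w (n - 1 - i)) = ((List.range n).map w).reverse := by
    apply List.ext_getElem
    · simp
    · intro i h1 h2
      simp only [List.getElem_map, List.getElem_reverse, List.getElem_range,
        List.length_map, List.length_range]
  rw [he]; exact List.reverse_perm _

-- the sorted event list is exactly pvCand

theorem cand_perm (b0 d s : Int) (n q : Nat) (hq : q ≤ n) :
    (pvCand b0 d s n q).Perm
      ((List.range n).map (pvS b0 d s) ++ (List.range n).map (pvE b0 d s)) := by
  unfold pvCand
  have hsplitS : (List.range n).map (pvS b0 d s)
      = (List.range q).map (pvS b0 d s)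
        ++ (List.range (n-q)).map (fun i => pvS b0 d s (i + q)) := by
    conv_lhs => rw [show n = q + (n - q) by omega, List.range_add]
    rw [List.map_append, List.map_map]
    congr 1
    apply List.map_congr_left; intro a _; simp [Nat.add_comm]
  have hsplitE : (List.range n).map (pvE b0 d s)
      = (List.range (n-q)).map (pvE b0 d s)
        ++ (List.range q).map (fun k => pvE b0 d s (n - q + k)) := by
    conv_lhs => rw [show n = (n-q) + q by omega, List.range_add]
    rw [List.map_append, List.map_map]
    rfl
  rw [hsplitS, hsplitE]
  have hM := perm_flat_pairs (pvE b0 d s) (fun i => pvS b0 d s (i + q)) (n - q)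
  have step1 : ((List.range q).map (pvS b0 d s)
        ++ (List.range (n-q)).flatMap (fun i => [pvE b0 d s i, pvS b0 d s (i + q)])
        ++ (List.range q).map (fun k => pvE b0 d s (n - q + k))).Perm
      (((List.range q).map (pvS b0 d s)
        ++ ((List.range (n-q)).map (pvE b0 d s)
            ++ (List.range (n-q)).map (fun i => pvS b0 d s (i + q))))
        ++ (List.range q).map (fun k => pvE b0 d s (n - q + k))) :=
    ((hM.append_left _).append_right _)
  refine step1.trans ?_
  have step2 : ((List.range q).map (pvS b0 d s)
        ++ ((List.range (n-q)).map (pvE b0 d s)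
            ++ (List.range (n-q)).map (fun i => pvS b0 d s (i + q))))
        ++ (List.range q).map (fun k => pvE b0 d s (n - q + k))
      = ((List.range q).map (pvS b0 d s) ++ (List.range (n-q)).map (pvE b0 d s))
        ++ ((List.range (n-q)).map (fun i => pvS b0 d s (i + q))
            ++ (List.range q).map (fun k => pvE b0 d s (n - q + k))) := by
    simp [List.append_assoc]
  rw [step2]
  exact perm_append_middle _ _ _ _

theorem cand_pairwise (b0 d s : Int) (n : Nat) (hd : 0 ≤ d) (hs : 2 ≤ s) (hn : 1 ≤ n) :
    (pvCand b0 d s n (pvQ d s n)).Pairwise (fun a b => pvEvLt b a = false) := by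
  obtain ⟨hq1, hqn, hf1, hf2, _⟩ := pvQ_facts d s n hd hs hn
  set q := pvQ d s n with hqdef
  have hs0 : (0:Int) < s := by omega
  have hBlt : ∀ i j : Nat, (j:Int) ≤ (i:Int) + (q:Int) - 1 → pvB b0 d j < pvB b0 d i + s := by
    intro i j h
    have h2 : ((j:Int) - i) * d ≤ ((q:Int)-1) * d := mul_le_mul_of_nonneg_right (by omega) hd
    have h3 := pvB_sub b0 d i j
    linarith
  have hBge : ∀ i j : Nat, q < n → (i:Int) + q ≤ j → pvB b0 d i + s ≤ pvB b0 d j := by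
    intro i j hqn' h
    have h2 : (q:Int) * d ≤ ((j:Int) - i) * d := mul_le_mul_of_nonneg_right (by omega) hd
    have h3 := pvB_sub b0 d i j
    have h4 := hf2 hqn'
    linarith
  unfold pvCand
  rw [List.append_assoc]
  refine List.pairwise_append.mpr ⟨?_, List.pairwise_append.mpr ⟨?_, ?_, ?_⟩, ?_⟩
  · -- starts block
    refine List.pairwise_map.mpr ((List.pairwise_lt_range).imp ?_)
    intro i j hij
    exact ltSS b0 d s (pvB_mono b0 d hd hij.le)
  · -- middle blocks
    apply pairwise_flat_pairs
    · intro i j hij hj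
      exact ltSE b0 d s hs0 (hBge i (j+q) (by omega) (by push_cast; omega))
    · intro i j hij hj
      exact ltEE b0 d s (pvB_mono b0 d hd hij.le)
    · intro i j hij hj
      exact ltSS b0 d s (pvB_mono b0 d hd (by omega))
    · intro i j hij hj
      exact ltES b0 d s (hBlt j (i+q) (by push_cast; omega))
  · -- tail ends block
    refine List.pairwise_map.mpr ((List.pairwise_lt_range).imp ?_)
    intro i j hij
    exact ltEE b0 d s (pvB_mono b0 d hd (by omega))
  · -- middle before tail
    intro x hx y hy
    simp only [List.mem_flatMap, List.mem_range, List.mem_cons, List.not_mem_nil,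
      or_false] at hx
    simp only [List.mem_map, List.mem_range] at hy
    obtain ⟨i, hi, hx⟩ := hx
    obtain ⟨k, hk, rfl⟩ := hy
    rcases hx with rfl | rfl
    · exact ltEE b0 d s (pvB_mono b0 d hd (by omega))
    · exact ltES b0 d s (hBlt (n-q+k) (i+q) (by push_cast; omega))
  · -- starts before everything else
    intro x hx y hy
    simp only [List.mem_map, List.mem_range] at hx
    obtain ⟨j, hj, rfl⟩ := hx
    rcases List.mem_append.mp hy with hy | hy
    · simp only [List.mem_flatMap, List.mem_range, List.mem_cons, List.not_mem_nil,
        or_false] at hy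
      obtain ⟨i, hi, hy⟩ := hy
      rcases hy with rfl | rfl
      · exact ltES b0 d s (hBlt i j (by push_cast; omega))
      · exact ltSS b0 d s (pvB_mono b0 d hd (by omega))
    · simp only [List.mem_map, List.mem_range] at hy
      obtain ⟨k, hk, rfl⟩ := hy
      exact ltES b0 d s (hBlt (n-q+k) j (by push_cast; omega))

-- ---- evaluating A's sweep on pvCand ----

def pvP (d c s : Int) (q : Nat) : Int :=
  (s - ((q:Int)-1)*d) * pvCov c s q + ((q:Int)*d - s) * pvCov c s (q-1)

theorem pvAct_cons (b0 d s : Int) (a m : Nat) :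
    pvAct b0 d s a (m+1) = pvI b0 d s a :: pvAct b0 d s (a+1) m := by
  unfold pvAct; rw [List.range'_succ]; simp

theorem pvAct_concat (b0 d s : Int) (a m : Nat) :
    pvAct b0 d s a m ++ [pvI b0 d s (a+m)] = pvAct b0 d s a (m+1) := by
  unfold pvAct; rw [List.range'_1_concat]; simp

theorem covLow (b0 d s : Int) (hd : 0 ≤ d) (hds : d ≤ s) :
    ∀ (m a : Nat) (x v : Int),
      (pvAct b0 d s (a+1) m).foldl pvMergeStep (x, pvB b0 d a + s, v)
        = (x, pvB b0 d (a + m) + s, v) := by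
  intro m
  induction m with
  | zero => intro a x v; simp [pvAct]
  | succ m ih =>
    intro a x v
    rw [pvAct_cons, List.foldl_cons]
    have h1 : pvB b0 d (a+1) = pvB b0 d a + d := by unfold pvB; push_cast; ring
    have hstep : pvMergeStep (x, pvB b0 d a + s, v) (pvI b0 d s (a+1))
        = (x, pvB b0 d (a+1) + s, v) := by
      unfold pvMergeStep pvI
      rw [if_neg (by simp only []; omega)]
      simp only [Prod.mk.injEq]
      refine ⟨by trivial, by omega, by trivial⟩
    rw [hstep]
    have := ih (a+1) x v
    rw [show a+1+m = a + (m+1) from by omega] at this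
    exact this

theorem covHigh (b0 d s : Int) (hsd : s < d) :
    ∀ (m a : Nat) (v : Int),
      (pvAct b0 d s (a+1) m).foldl pvMergeStep (pvB b0 d a, pvB b0 d a + s, v)
        = (pvB b0 d (a + m), pvB b0 d (a + m) + s, v + (m:Int) * s) := by
  intro m
  induction m with
  | zero => intro a v; simp [pvAct]
  | succ m ih =>
    intro a v
    rw [pvAct_cons, List.foldl_cons]
    have h1 : pvB b0 d (a+1) = pvB b0 d a + d := by unfold pvB; push_cast; ring
    have hstep : pvMergeStep (pvB b0 d a, pvB b0 d a + s, v) (pvI b0 d s (a+1))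
        = (pvB b0 d (a+1), pvB b0 d (a+1) + s, v + s) := by
      unfold pvMergeStep pvI
      rw [if_pos (by simp only []; omega)]
      simp only [Prod.mk.injEq]
      refine ⟨by trivial, by trivial, by omega⟩
    rw [hstep]
    have := ih (a+1) (v + s)
    rw [show a+1+m = a + (m+1) from by omega] at this
    rw [this]
    simp only [Prod.mk.injEq]
    refine ⟨by trivial, by trivial, by push_cast; ring⟩

theorem covEval (b0 d s : Int) (hd : 0 ≤ d) (hs : 0 < s) (a m : Nat) (hm : 1 ≤ m) :
    pvCalcCoverage (pvAct b0 d s a m) = (((m:Int) - 1) * min d s + s, pvAct b0 d s a m) := by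
  obtain ⟨m', rfl⟩ : ∃ m', m = m' + 1 := ⟨m-1, by omega⟩
  have hne : pvAct b0 d s a (m'+1) ≠ [] := by
    rw [pvAct_cons]; exact List.cons_ne_nil _ _
  have hsorted : pvSort pvPairLt (pvAct b0 d s a (m'+1)) = pvAct b0 d s a (m'+1) := by
    apply pvSort_eq_of pvPairLt pvPairLt_asym pvPairLt_trans pvPairLt_conn _ _ (List.Perm.refl _)
    unfold pvAct
    refine List.pairwise_map.mpr ((List.pairwise_lt_range' 1).imp ?_)
    intro i j hij
    exact ltII b0 d s (pvB_mono b0 d hd hij.le)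
  unfold pvCalcCoverage
  rw [if_neg hne, hsorted, pvAct_cons]
  have hI : pvI b0 d s a = (pvB b0 d a, pvB b0 d a + s) := rfl
  rw [hI]
  simp only []
  have hfirst : pvMergeStep (pvB b0 d a, pvB b0 d a + s, 0) (pvB b0 d a, pvB b0 d a + s)
      = (pvB b0 d a, pvB b0 d a + s, 0) := by
    unfold pvMergeStep
    rw [if_neg (by simp only []; omega)]
    simp
  rw [List.foldl_cons, hfirst]
  rcases le_or_gt d s with hds | hsd
  · rw [covLow b0 d s hd hds m' a]
    have hmin : min d s = d := min_eq_left hds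
    have hsub := pvB_sub b0 d a (a + m')
    simp only [hmin, Prod.mk.injEq]
    refine ⟨by push_cast at hsub ⊢; nlinarith [hsub], by trivial⟩
  · rw [covHigh b0 d s hsd m' a]
    have hmin : min d s = s := min_eq_right (by omega)
    simp only [hmin, Prod.mk.injEq]
    refine ⟨by push_cast; ring, by trivial⟩

theorem stepStart (b0 d s : Int) (hd : 0 ≤ d) (hs : 0 < s) (a m j : Nat) (px tot : Int) :
    pvStep (pvAct b0 d s a m, px, tot) (pvS b0 d s j)
      = (pvAct b0 d s a m ++ [pvI b0 d s j], pvB b0 d j,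
         tot + (pvB b0 d j - px) * pvCov (min d s) s m) := by
  by_cases hm : m = 0
  · subst hm
    have hact : pvAct b0 d s a 0 = [] := rfl
    unfold pvStep pvCalcCoverage pvCov pvS pvI
    rw [hact]
    simp
  · unfold pvStep
    simp only []
    rw [covEval b0 d s hd hs a m (by omega)]
    unfold pvCov
    rw [if_neg hm]
    unfold pvS pvI
    simp

theorem stepEnd (b0 d s : Int) (hd : 0 ≤ d) (hs : 0 < s) (a m : Nat) (px tot : Int) :
    pvStep (pvAct b0 d s a (m+1), px, tot) (pvE b0 d s a)
      = (pvAct b0 d s (a+1) m, pvB b0 d a + s,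
         tot + (pvB b0 d a + s - px) * pvCov (min d s) s (m+1)) := by
  unfold pvStep
  simp only []
  rw [covEval b0 d s hd hs a (m+1) (by omega)]
  have hrem : PySem.List.remove? (pvAct b0 d s a (m+1)) (pvE b0 d s a |>.2.1, pvE b0 d s a |>.2.2.1)
      = some (pvAct b0 d s (a+1) m) := by
    rw [pvAct_cons]
    have : ((pvE b0 d s a).2.1, (pvE b0 d s a).2.2.1) = pvI b0 d s a := rfl
    rw [this]
    exact PySem.List.remove?_cons_self _ _
  have hne : ¬ ((pvE b0 d s a).2.2.2 = 1) := by unfold pvE; simp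
  rw [if_neg hne, hrem]
  unfold pvCov pvE
  simp

theorem phase1 (b0 d s : Int) (hd : 0 ≤ d) (hs : 0 < s) :
    ∀ q : Nat, 1 ≤ q →
      ((List.range q).map (pvS b0 d s)).foldl pvStep ([], pvB b0 d 0, 0)
        = (pvAct b0 d s 0 q, pvB b0 d (q-1), pvW d (min d s) s (q-1)) := by
  intro q
  induction q with
  | zero => intro h; omega
  | succ q ih =>
    intro _
    by_cases hq : q = 0
    · subst hq
      have h0 : pvAct b0 d s 0 0 = [] := rfl
      rw [show List.range 1 = [0] from rfl]
      simp only [List.map_cons, List.map_nil, List.foldl_cons, List.foldl_nil]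
      rw [← h0, stepStart b0 d s hd hs 0 0 0 (pvB b0 d 0) 0]
      have : pvCov (min d s) s 0 = 0 := rfl
      rw [this]
      have : pvAct b0 d s 0 0 ++ [pvI b0 d s 0] = pvAct b0 d s 0 1 := pvAct_concat b0 d s 0 0
      rw [this]
      simp [pvW]
    · rw [List.range_succ, List.map_append, List.foldl_append, ih (by omega)]
      simp only [List.map_cons, List.map_nil, List.foldl_cons, List.foldl_nil]
      rw [stepStart b0 d s hd hs 0 q q _ _]
      rw [show pvAct b0 d s 0 q ++ [pvI b0 d s q] = pvAct b0 d s 0 (q+1) from by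
        simpa using pvAct_concat b0 d s 0 q]
      simp only [Prod.mk.injEq, Nat.add_sub_cancel]
      refine ⟨by trivial, by trivial, ?_⟩
      obtain ⟨q', rfl⟩ : ∃ q', q = q' + 1 := ⟨q-1, by omega⟩
      have hW : pvW d (min d s) s (q'+1) = pvW d (min d s) s q' + d * ((q':Int) * min d s + s) := rfl
      have hcov : pvCov (min d s) s (q'+1) = ((q':Int)+1-1) * min d s + s := by
        unfold pvCov; rw [if_neg (by omega)]; push_cast; ring
      have hsub := pvB_sub b0 d q' (q'+1)
      simp only [Nat.add_sub_cancel]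
      rw [hW, hcov]
      have : pvB b0 d (q'+1) - pvB b0 d q' = d := by push_cast at hsub; nlinarith [hsub]
      rw [show pvB b0 d (q'+1) = pvB b0 d q' + d from by omega]
      ring

theorem phase2 (b0 d s : Int) (hd : 0 ≤ d) (hs : 0 < s) (q : Nat) (hq : 1 ≤ q) (T : Int) :
    ∀ mm : Nat,
      ((List.range mm).flatMap (fun i => [pvE b0 d s i, pvS b0 d s (i + q)])).foldl pvStep
          (pvAct b0 d s 0 q, pvB b0 d (q-1), T)
        = (pvAct b0 d s mm q, pvB b0 d (mm+q-1), T + (mm:Int) * pvP d (min d s) s q) := by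
  intro mm
  induction mm with
  | zero => simp
  | succ mm ih =>
    rw [List.range_succ, List.flatMap_append, List.foldl_append, ih]
    simp only [List.flatMap_cons, List.flatMap_nil, List.append_nil, List.foldl_cons,
      List.foldl_nil]
    obtain ⟨q', rfl⟩ : ∃ q', q = q' + 1 := ⟨q-1, by omega⟩
    rw [stepEnd b0 d s hd hs mm q' _ _]
    rw [stepStart b0 d s hd hs (mm+1) q' (mm+(q'+1)) _ _]
    rw [show pvAct b0 d s (mm+1) q' ++ [pvI b0 d s (mm+(q'+1))] = pvAct b0 d s (mm+1) (q'+1) from by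
      have h := pvAct_concat b0 d s (mm+1) q'
      rw [show mm+1+q' = mm+(q'+1) from by omega] at h
      exact h]
    rw [show mm+1+(q'+1)-1 = mm+(q'+1) from by omega]
    simp only [Prod.mk.injEq, Nat.add_sub_cancel]
    refine ⟨by trivial, by trivial, ?_⟩
    have h1 : pvB b0 d (mm+(q'+1)) = pvB b0 d mm + ((q':Int)+1)*d := by
      unfold pvB; push_cast; ring
    have h2 : pvB b0 d (mm+(q'+1)-1) = pvB b0 d mm + (q':Int)*d := by
      rw [show mm+(q'+1)-1 = mm+q' from by omega]
      unfold pvB; push_cast; ring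
    have h3 : pvB b0 d (q'+1-1) = pvB b0 d q' := by rw [Nat.add_sub_cancel]
    rw [h1, h2]
    unfold pvP pvCov
    simp only [Nat.add_sub_cancel]
    rw [if_neg (by omega : ¬ (q'+1 = 0))]
    by_cases hq0 : q' = 0
    · subst hq0
      simp only [if_pos rfl]
      push_cast
      ring
    · rw [if_neg hq0]
      push_cast
      ring

theorem phase3run (b0 d s : Int) (hd : 0 ≤ d) (hs : 0 < s) :
    ∀ (m a : Nat) (T : Int),
      ((List.range' (a+1) m).map (pvE b0 d s)).foldl pvStep
          (pvAct b0 d s (a+1) m, pvB b0 d a + s, T)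
        = ([], pvB b0 d (a+m) + s, T + pvW d (min d s) s m) := by
  intro m
  induction m with
  | zero => intro a T; simp [pvW, pvAct]
  | succ m ih =>
    intro a T
    rw [List.range'_succ, List.map_cons, List.foldl_cons]
    rw [stepEnd b0 d s hd hs (a+1) m _ _]
    have h1 : pvB b0 d (a+1) + s - (pvB b0 d a + s) = d := by
      have := pvB_sub b0 d a (a+1); push_cast at this; nlinarith [this]
    rw [show pvB b0 d (a+1) + s - (pvB b0 d a + s) = d from h1]
    have := ih (a+1) (T + d * pvCov (min d s) s (m+1))
    rw [this]
    simp only [Prod.mk.injEq]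
    refine ⟨by trivial, by rw [show a+1+m = a+(m+1) from by omega], ?_⟩
    have hW : pvW d (min d s) s (m+1) = pvW d (min d s) s m + d * ((m:Int) * min d s + s) := rfl
    have hcov : pvCov (min d s) s (m+1) = (m:Int) * min d s + s := by
      unfold pvCov; rw [if_neg (by omega)]; push_cast; ring
    rw [hW, hcov]
    ring

theorem pvW_closed (d c s : Int) : ∀ m : Nat, 2 * pvW d c s m = d * (2*(m:Int)*s + c*(m:Int)*((m:Int)-1)) := by
  intro m
  induction m with
  | zero => simp [pvW]
  | succ m ih =>
    have h : pvW d c s (m+1) = pvW d c s m + d * ((m:Int) * c + s) := rfl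
    rw [h]
    push_cast
    nlinarith [ih]

theorem sweep_main (b0 d s : Int) (n : Nat) (hn : 1 ≤ n) (hd : 0 ≤ d) (hs : 2 ≤ s) :
    ∃ rest, pvCand b0 d s n (pvQ d s n) = pvS b0 d s 0 :: rest ∧
    ((pvCand b0 d s n (pvQ d s n)).foldl pvStep ([], b0, 0)).2.2
      = (n : Int) * s * s - ((n : Int) - 1) * (s - min d s) * (s - min d s) := by
  obtain ⟨hq1, hqn, hf1, hf2, hd0⟩ := pvQ_facts d s n hd hs hn
  set q := pvQ d s n with hqdef
  have hs0 : (0:Int) < s := by omega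
  obtain ⟨q', hq'⟩ : ∃ q', q = q'+1 := ⟨q-1, by omega⟩
  rw [hq'] at hqn hf1 hf2 hd0 ⊢
  have hhead : ∃ rest, pvCand b0 d s n (q'+1) = pvS b0 d s 0 :: rest := by
    unfold pvCand
    rw [List.range_succ_eq_map]
    exact ⟨_, rfl⟩
  obtain ⟨rest, hrest⟩ := hhead
  refine ⟨rest, hrest, ?_⟩
  unfold pvCand
  rw [List.foldl_append, List.foldl_append]
  have h1 := phase1 b0 d s hd hs0 (q'+1) (by omega)
  have hb0 : pvB b0 d 0 = b0 := by unfold pvB; simp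
  rw [hb0] at h1
  rw [h1]
  rw [phase2 b0 d s hd hs0 (q'+1) (by omega) _ (n - (q'+1))]
  have hP3 : (List.range (q'+1)).map (fun k => pvE b0 d s (n-(q'+1)+k))
      = (List.range' (n-(q'+1)) (q'+1)).map (pvE b0 d s) := by
    rw [List.range'_eq_map_range, List.map_map]; rfl
  rw [hP3, List.range'_succ, List.map_cons, List.foldl_cons]
  rw [stepEnd b0 d s hd hs0 (n-(q'+1)) q' _ _]
  rw [phase3run b0 d s hd hs0 q' (n-(q'+1)) _]
  simp only [Nat.add_sub_cancel]
  -- now pure arithmetic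
  have hc1 : ((n - (q'+1) : Nat) : Int) = (n:Int) - (q':Int) - 1 := by push_cast; omega
  have hidx : (n-(q'+1))+(q'+1)-1 = n-1 := by omega
  rw [hidx]
  have hB1 : pvB b0 d (n-1) = pvB b0 d (n-(q'+1)) + (q':Int)*d := by
    unfold pvB
    rw [show ((n-1 : Nat) : Int) = ((n-(q'+1) : Nat) : Int) + (q':Int) from by push_cast; omega]
    ring
  rw [hB1, hc1]
  have hcovq1 : pvCov (min d s) s (q'+1) = (q':Int) * min d s + s := by
    unfold pvCov; rw [if_neg (by omega)]; push_cast; ring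
  unfold pvP
  rw [hcovq1]
  simp only [Nat.add_sub_cancel]
  rcases eq_or_lt_of_le hd with hdz | hdpos
  · -- d = 0
    have hd' : d = 0 := hdz.symm
    subst hd'
    have hn' : q'+1 = n := hd0 rfl
    have hcz : min (0:Int) s = 0 := min_eq_left (le_of_lt hs0)
    have hWz : ∀ m : Nat, pvW 0 (min (0:Int) s) s m = 0 := by
      intro m
      have := pvW_closed 0 (min (0:Int) s) s m
      omega
    rw [hWz, hcz]
    rw [show (n:Int) - (q':Int) - 1 = 0 from by omega]
    unfold pvCov
    simp
    ring
  · rcases le_or_gt s d with hsd | hds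
    · -- s ≤ d : q' = 0
      have hq0 : q' = 0 := by
        by_contra hne
        have h1q : (1:Int) ≤ (q':Int) := by omega
        have hm := mul_le_mul_of_nonneg_right h1q hd
        push_cast at hf1
        nlinarith
      subst hq0
      have hcs : min d s = s := min_eq_right (by omega)
      rw [hcs]
      unfold pvW pvCov
      simp
      ring
    · -- 0 < d < s
      have hcd : min d s = d := min_eq_left (by omega)
      rw [hcd]
      by_cases hq0 : q' = 0
      · subst hq0
        have hn1 : n = 1 := by
          by_contra hne
          have := hf2 (by omega)
          simp at this
          omega
        subst hn1
        unfold pvW pvCov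
        simp
      · have hW := pvW_closed d d s q'
        unfold pvCov
        rw [if_neg hq0]
        push_cast
        linear_combination hW

theorem sorted_events_eq (b0 d s : Int) (n : Nat) (hn : 1 ≤ n) (hd : 0 ≤ d) (hs : 2 ≤ s)
    (events : List (Int × Int × Int × Int))
    (hperm : events.Perm ((List.range n).map (pvS b0 d s) ++ (List.range n).map (pvE b0 d s))) :
    pvSort pvEvLt events = pvCand b0 d s n (pvQ d s n) := by
  obtain ⟨hq1, hqn, hf1, hf2, _⟩ := pvQ_facts d s n hd hs hn
  exact pvSort_eq_of pvEvLt pvEvLt_asym pvEvLt_trans pvEvLt_conn events _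
    ((cand_perm b0 d s n (pvQ d s n) hqn).trans hperm.symm)
    (cand_pairwise b0 d s n hd hs hn)

-- the event list A builds, as pvS/pvE events

theorem events_perm_pos (K L : Int) (n : Nat) (hK : 0 ≤ K) :
    ((List.range n).flatMap (fun i : Nat =>
        [((i:Int)*K - L, (i:Int)*K - L, (i:Int)*K + L, (1:Int)),
         ((i:Int)*K + L, (i:Int)*K - L, (i:Int)*K + L, (-1:Int))])).Perm
      ((List.range n).map (pvS (-L) K (2*L)) ++ (List.range n).map (pvE (-L) K (2*L))) := by
  have hf : ∀ i ∈ List.range n,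
      ([((i:Int)*K - L, (i:Int)*K - L, (i:Int)*K + L, (1:Int)),
        ((i:Int)*K + L, (i:Int)*K - L, (i:Int)*K + L, (-1:Int))] : List (Int × Int × Int × Int))
        = [pvS (-L) K (2*L) i, pvE (-L) K (2*L) i] := by
    intro i _
    have h1 : (i:Int)*K - L = pvB (-L) K i := by unfold pvB; ring
    have h2 : (i:Int)*K + L = pvB (-L) K i + 2*L := by unfold pvB; ring
    rw [h1, h2]
    rfl
  rw [List.flatMap_def, List.map_congr_left hf, ← List.flatMap_def]
  exact perm_flat_pairs (pvS (-L) K (2*L)) (pvE (-L) K (2*L)) n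

theorem events_perm_neg (K L : Int) (n : Nat) (hK : K < 0) :
    ((List.range n).flatMap (fun i : Nat =>
        [((i:Int)*K - L, (i:Int)*K - L, (i:Int)*K + L, (1:Int)),
         ((i:Int)*K + L, (i:Int)*K - L, (i:Int)*K + L, (-1:Int))])).Perm
      ((List.range n).map (pvS (((n:Int)-1)*K - L) (-K) (2*L))
        ++ (List.range n).map (pvE (((n:Int)-1)*K - L) (-K) (2*L))) := by
  have hf : ∀ i ∈ List.range n,
      ([((i:Int)*K - L, (i:Int)*K - L, (i:Int)*K + L, (1:Int)),
        ((i:Int)*K + L, (i:Int)*K - L, (i:Int)*K + L, (-1:Int))] : List (Int × Int × Int × Int))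
        = [pvS (((n:Int)-1)*K - L) (-K) (2*L) (n-1-i), pvE (((n:Int)-1)*K - L) (-K) (2*L) (n-1-i)] := by
    intro i hi
    have hi' : i < n := List.mem_range.mp hi
    have hcast : ((n-1-i : Nat) : Int) = (n:Int) - 1 - (i:Int) := by omega
    have h1 : (i:Int)*K - L = pvB (((n:Int)-1)*K - L) (-K) (n-1-i) := by
      unfold pvB; rw [hcast]; ring
    have h2 : (i:Int)*K + L = pvB (((n:Int)-1)*K - L) (-K) (n-1-i) + 2*L := by
      unfold pvB; rw [hcast]; ring
    rw [h1, h2]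
    rfl
  rw [List.flatMap_def, List.map_congr_left hf, ← List.flatMap_def]
  refine (perm_flat_pairs (fun i => pvS (((n:Int)-1)*K - L) (-K) (2*L) (n-1-i))
    (fun i => pvE (((n:Int)-1)*K - L) (-K) (2*L) (n-1-i)) n).trans ?_
  exact (revmap_perm _ n).append (revmap_perm _ n)

theorem union_area_of_squares_eval (N K L : Int) (hN : 1 ≤ N) (hL : 1 ≤ L) :
    union_area_of_squares N K L
      = N * (2*L) * (2*L) - (N - 1) * (2*L - min |K| (2*L)) * (2*L - min |K| (2*L)) := by
  have hnN : ((N.toNat : Int)) = N := Int.toNat_of_nonneg (by omega)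
  set n := N.toNat with hn
  unfold union_area_of_squares
  rw [PySem.List.foldl_append_eq_flatMap]
  rw [show PySem.List.pyRange 0 N 1 = (List.range n).map (fun k : Nat => (k:Int)) from by
    rw [← hnN]; exact PySem.List.pyRange_zero_natCast n]
  rw [List.flatMap_map]
  simp only [List.nil_append]
  have hs2 : (2:Int) ≤ 2*L := by omega
  have hn1 : 1 ≤ n := by omega
  rcases le_or_gt 0 K with hK | hK
  · have habs : |K| = K := abs_of_nonneg hK
    have hperm := events_perm_pos K L n hK
    have hsorted := sorted_events_eq (-L) K (2*L) n hn1 hK hs2 _ hperm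
    rw [hsorted]
    obtain ⟨rest, hrest, htot⟩ := sweep_main (-L) K (2*L) n hn1 hK hs2
    rw [hrest] at htot ⊢
    have hfst : (pvS (-L) K (2*L) 0).1 = -L := by unfold pvS pvB; simp
    simp only [hfst]
    rw [htot, hnN, habs]
  · have habs : |K| = -K := abs_of_neg hK
    have hd : (0:Int) ≤ -K := by omega
    have hperm := events_perm_neg K L n hK
    have hsorted := sorted_events_eq (((n:Int)-1)*K - L) (-K) (2*L) n hn1 hd hs2 _ hperm
    rw [hsorted]
    obtain ⟨rest, hrest, htot⟩ := sweep_main (((n:Int)-1)*K - L) (-K) (2*L) n hn1 hd hs2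
    rw [hrest] at htot ⊢
    have hfst : (pvS (((n:Int)-1)*K - L) (-K) (2*L) 0).1 = ((n:Int)-1)*K - L := by
      unfold pvS pvB; simp
    simp only [hfst]
    rw [htot, hnN, habs]

-- ===== VERDICT (by name: the statement is the Claim_ definition above) =====
theorem union_area_of_squares_spec : Claim_equal_union_area_of_squares := by
  intro N K L _hdom hpre
  obtain ⟨hN, hL⟩ := hpre
  unfold Spec_union_area_of_squares
  rw [union_area_of_squares_eval N K L hN hL]
  unfold union_area_of_squares_alt
  rw [if_neg (by omega : ¬ (N < 1 ∨ L < 1))]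
  simp only []
  rcases le_or_gt (2*L) |K| with h | h
  · have h1 : 2*L - |K| < 0 ∨ 2*L - |K| = 0 := by omega
    have hmin : min |K| (2*L) = 2*L := by omega
    rcases h1 with h1 | h1 <;> simp [hmin, h1]
  · have hmin : min |K| (2*L) = |K| := by omega
    have h1 : ¬ (2*L - |K| < 0) := by omega
    simp [hmin, h1]
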